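-- pv_equiv track=rewrite | github.com/Xinglab/ProteoSeq | scripts/classify_uniprot_peptides_wgencode.py | get_pep_out_line
-- ===== SOURCE A (Python) =====
-- def get_pep_out_line(psm_count_dict, sample_list):
--     pep_dict = {}
--     for peptide, sample_psm_dict in psm_count_dict.items():
--         for sample, psm_count in sample_psm_dict.items():
--             if psm_count > 0:
--                 pep_dict.setdefault(sample, set()).add(peptide)
--     pep_list = ['%d'%len(pep_dict.get(sample, set())) for sample in sample_list]
--     return '%d\t%s'%(len(psm_count_dict), '\t'.join(pep_list))
-- ===== SOURCE B (Python) =====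
-- def get_pep_out_line(psm_count_dict, sample_list):
--     pep_list = ['%d' % sum(1 for sample_psm_dict in psm_count_dict.values()
--                            if sample_psm_dict.get(sample, 0) > 0)
--                 for sample in sample_list]
--     return '%d\t%s' % (len(psm_count_dict), '\t'.join(pep_list))
-- ===== Notes on version B (the rewrite author's own statement) =====
-- stated objective: simpler
-- what changed: Drops the intermediate sample->set-of-peptides index entirely: for each sample B rescans the peptide table and counts peptides whose PSM count for that sample is positive, instead of building pep_dict of sets in one pass and reading lengths.
import Mathlib
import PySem

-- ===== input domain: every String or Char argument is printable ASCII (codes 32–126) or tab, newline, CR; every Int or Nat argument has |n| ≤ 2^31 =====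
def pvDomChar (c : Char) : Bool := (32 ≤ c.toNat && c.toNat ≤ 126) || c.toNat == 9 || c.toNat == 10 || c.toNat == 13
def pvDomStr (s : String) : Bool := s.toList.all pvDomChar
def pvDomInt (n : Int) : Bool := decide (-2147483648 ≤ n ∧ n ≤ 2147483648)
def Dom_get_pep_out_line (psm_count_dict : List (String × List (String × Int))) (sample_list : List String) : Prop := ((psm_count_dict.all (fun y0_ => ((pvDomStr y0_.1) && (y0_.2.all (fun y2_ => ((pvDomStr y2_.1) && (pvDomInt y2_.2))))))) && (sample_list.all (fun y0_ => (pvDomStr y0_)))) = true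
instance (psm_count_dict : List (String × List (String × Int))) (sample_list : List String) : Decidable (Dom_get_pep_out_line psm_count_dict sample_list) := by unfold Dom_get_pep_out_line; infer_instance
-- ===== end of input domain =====

-- B drops A's sample→set-of-peptides index and instead counts, per sample, the peptides whose
-- PSM count for that sample is positive, by rescanning the peptide table (objective: simpler).

-- ===== PORT A =====
-- inner loop body: 'if psm_count > 0: pep_dict.setdefault(sample, set()).add(peptide)'
def pvAStepInner (pep : String) (d : PySem.Dict String (PySem.Set String)) (q : String × Int) :
    PySem.Dict String (PySem.Set String) :=
  if q.2 > 0 then PySem.Dict.modify d q.1 [] (fun st => PySem.Set.add st pep) else d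

-- outer loop body: one peptide's inner dict processed
def pvAStep (d : PySem.Dict String (PySem.Set String)) (p : String × List (String × Int)) :
    PySem.Dict String (PySem.Set String) :=
  p.2.foldl (pvAStepInner p.1) d

def get_pep_out_line (psm_count_dict : List (String × List (String × Int))) (sample_list : List String) : String :=
  let pep_dict := psm_count_dict.foldl pvAStep PySem.Dict.empty
  let pep_list := sample_list.map (fun s =>
    PySem.Int.toStr ((PySem.Dict.getD pep_dict s ([] : PySem.Set String)).length : Int))
  PySem.Int.toStr (psm_count_dict.length : Int) ++ "\t" ++ PySem.Str.join "\t" pep_list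

-- ===== PORT B =====
def get_pep_out_line_alt (psm_count_dict : List (String × List (String × Int))) (sample_list : List String) : String :=
  let pep_list := sample_list.map (fun s =>
    PySem.Int.toStr (psm_count_dict.foldl
      (fun acc p => if PySem.Dict.getD (PySem.Dict.mk p.2) s 0 > 0 then acc + 1 else acc) (0 : Int)))
  PySem.Int.toStr (psm_count_dict.length : Int) ++ "\t" ++ PySem.Str.join "\t" pep_list

-- ===== PRECONDITION & SPEC =====
-- Pre_ excludes association lists with duplicate outer (peptide) or inner (sample) keys: a Python
-- dict cannot hold them, so which value such a list denotes is an artefact of the dict conversion.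
def Pre_get_pep_out_line (psm_count_dict : List (String × List (String × Int))) (sample_list : List String) : Prop :=
  (psm_count_dict.map Prod.fst).Nodup ∧ ∀ p ∈ psm_count_dict, (p.2.map Prod.fst).Nodup
instance (psm_count_dict : List (String × List (String × Int))) (sample_list : List String) : Decidable (Pre_get_pep_out_line psm_count_dict sample_list) := by unfold Pre_get_pep_out_line; infer_instance

def pvWitness_get_pep_out_line : (List (String × List (String × Int))) × List String :=
  ([("p", [("s", 1)]), ("q", [("s", 0), ("t", 2)])], ["s", "t", "u"])

def Spec_get_pep_out_line (psm_count_dict : List (String × List (String × Int))) (sample_list : List String) (out : String) : Prop := out = get_pep_out_line_alt psm_count_dict sample_list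
instance (psm_count_dict : List (String × List (String × Int))) (sample_list : List String) (out : String) : Decidable (Spec_get_pep_out_line psm_count_dict sample_list out) := by unfold Spec_get_pep_out_line; infer_instance

-- ===== CLAIM (what is proved, stated in full; the proofs are below) =====
def Claim_equal_get_pep_out_line : Prop := ∀ (psm_count_dict : List (String × List (String × Int))) (sample_list : List String), Dom_get_pep_out_line psm_count_dict sample_list → Pre_get_pep_out_line psm_count_dict sample_list → Spec_get_pep_out_line psm_count_dict sample_list (get_pep_out_line psm_count_dict sample_list)

-- ===== LEMMAS AND PROOFS =====

-- the peptide's condition for sample s, as A's inner loop sees it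
def pvCondA (s : String) (p : String × List (String × Int)) : Bool :=
  p.2.any (fun q => q.1 == s && decide (q.2 > 0))

-- A's inner loop, seen through one lookup: it adds pep to the set at s iff some entry (s, c>0) occurs
lemma inner_getD (pep : String) (l : List (String × Int)) (d : PySem.Dict String (PySem.Set String)) (s : String) :
    PySem.Dict.getD (l.foldl (pvAStepInner pep) d) s ([] : PySem.Set String) =
      if l.any (fun q => q.1 == s && decide (q.2 > 0)) then
        PySem.Set.add (PySem.Dict.getD d s []) pep
      else PySem.Dict.getD d s [] := by
  induction l generalizing d with
  | nil => simp
  | cons q l ih =>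
    simp only [List.foldl_cons, List.any_cons, pvAStepInner]
    by_cases hq : q.2 > 0
    · rw [if_pos hq, ih]
      by_cases hs : q.1 = s
      · subst hs
        rw [PySem.Dict.getD_modify]
        simp only [beq_self_eq_true, Bool.true_and, decide_eq_true hq, Bool.true_or, if_true]
        split
        · exact PySem.Set.add_of_mem ((PySem.Set.mem_add _ _ _).mpr (Or.inr rfl))
        · rfl
      · have hbe : (q.1 == s) = false := beq_eq_false_iff_ne.mpr hs
        rw [PySem.Dict.getD_modify, if_neg (Ne.symm hs)]
        simp only [hbe, Bool.false_and, Bool.false_or]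
    · rw [if_neg hq, ih]
      simp only [decide_eq_false hq, Bool.and_false, Bool.false_or]

-- membership after A's inner loop: nothing but pep can have been added
lemma inner_mem (pep x : String) (l : List (String × Int)) (d : PySem.Dict String (PySem.Set String)) (s : String)
    (hx : x ∈ PySem.Dict.getD (l.foldl (pvAStepInner pep) d) s ([] : PySem.Set String)) :
    x ∈ PySem.Dict.getD d s ([] : PySem.Set String) ∨ x = pep := by
  rw [inner_getD] at hx
  split at hx
  · exact (PySem.Set.mem_add _ _ _).mp hx
  · exact Or.inl hx

-- A's outer loop counts, at each sample, the peptides satisfying pvCondA (given fresh distinct names)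
lemma outer_len (psm : List (String × List (String × Int))) (d : PySem.Dict String (PySem.Set String)) (s : String)
    (hnd : (psm.map Prod.fst).Nodup)
    (hfresh : ∀ p ∈ psm, p.1 ∉ PySem.Dict.getD d s ([] : PySem.Set String)) :
    (PySem.Dict.getD (psm.foldl pvAStep d) s ([] : PySem.Set String)).length =
      (PySem.Dict.getD d s ([] : PySem.Set String)).length + psm.countP (pvCondA s) := by
  induction psm generalizing d with
  | nil => simp
  | cons p rest ih =>
    simp only [List.map_cons, List.nodup_cons] at hnd
    have hfrest : ∀ p' ∈ rest, p'.1 ∉ PySem.Dict.getD (pvAStep d p) s ([] : PySem.Set String) := by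
      intro p' hp' hmem
      rcases inner_mem p.1 p'.1 p.2 d s hmem with h | h
      · exact hfresh p' (List.mem_cons_of_mem _ hp') h
      · have hm : p'.1 ∈ rest.map Prod.fst := List.mem_map_of_mem (f := Prod.fst) hp'
        rw [h] at hm
        exact hnd.1 hm
    rw [List.foldl_cons, ih (pvAStep d p) hnd.2 hfrest]
    have hlen : (PySem.Dict.getD (pvAStep d p) s ([] : PySem.Set String)).length =
        (PySem.Dict.getD d s ([] : PySem.Set String)).length + (if pvCondA s p then 1 else 0) := by
      unfold pvAStep
      rw [inner_getD]
      unfold pvCondA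
      split
      · rw [PySem.Set.add_of_not_mem (hfresh p (List.mem_cons_self) ), List.length_append]
        rfl
      · simp
    rw [hlen, List.countP_cons]
    unfold pvCondA
    split
    · simp; omega
    · simp

-- with distinct inner keys, 'some positive entry for s' is exactly 'the dict's value at s is positive'
lemma condA_eq_getD (l : List (String × Int)) (s : String) (hnd : (l.map Prod.fst).Nodup) :
    l.any (fun q => q.1 == s && decide (q.2 > 0)) = decide (PySem.Dict.getD (PySem.Dict.mk l) s 0 > 0) := by
  induction l with
  | nil => simp [PySem.Dict.getD_eq_get?_getD, PySem.Dict.get?]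
  | cons q l ih =>
    obtain ⟨k, c⟩ := q
    simp only [List.map_cons, List.nodup_cons] at hnd
    simp only [List.any_cons, PySem.Dict.getD_eq_get?_getD, PySem.Dict.get?_mk_cons]
    by_cases hs : k = s
    · subst hs
      have hrest : l.any (fun q' => q'.1 == k && decide (q'.2 > 0)) = false := by
        simp only [List.any_eq_false]
        intro q' hq'
        have hne : q'.1 ≠ k := fun h => hnd.1 (h ▸ List.mem_map_of_mem (f := Prod.fst) hq')
        simp [beq_eq_false_iff_ne.mpr hne]
      simp [hrest]
    · have hbe : (k == s) = false := beq_eq_false_iff_ne.mpr hs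
      rw [hbe]
      simp only [Bool.false_and, Bool.false_or]
      rw [ih hnd.2]
      simp [PySem.Dict.getD_eq_get?_getD]

-- ===== VERDICT (by name: the statement is the Claim_ definition above) =====
theorem get_pep_out_line_spec : Claim_equal_get_pep_out_line := by
  intro psm samples _hdom hpre
  simp only [Spec_get_pep_out_line, get_pep_out_line, get_pep_out_line_alt]
  have hmap : samples.map (fun s =>
      PySem.Int.toStr ((PySem.Dict.getD (psm.foldl pvAStep PySem.Dict.empty) s ([] : PySem.Set String)).length : Int)) =
      samples.map (fun s => PySem.Int.toStr (psm.foldl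
        (fun acc p => if PySem.Dict.getD (PySem.Dict.mk p.2) s 0 > 0 then acc + 1 else acc) (0 : Int))) := by
    apply List.map_congr_left
    intro s _hs
    congr 1
    have hcount := PySem.List.foldl_count_if (fun p => decide (PySem.Dict.getD (PySem.Dict.mk p.2) s 0 > 0)) psm 0
    simp only [decide_eq_true_eq] at hcount
    rw [hcount]
    have hc : List.countP (pvCondA s) psm =
        List.countP (fun p => decide (PySem.Dict.getD (PySem.Dict.mk p.2) s 0 > 0)) psm :=
      List.countP_congr (fun p hp => by simp [pvCondA, condA_eq_getD p.2 s (hpre.2 p hp)])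
    rw [outer_len psm PySem.Dict.empty s hpre.1
      (by intro p _ h; simp [PySem.Dict.getD_eq_get?_getD, PySem.Dict.get?_empty] at h), hc]
    simp [PySem.Dict.getD_eq_get?_getD, PySem.Dict.get?_empty]
  rw [hmap]
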